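-- pv_equiv track=rewrite | github.com/felipechatalov/01-Knapsack-Problem | mochila.py | get_neightbours
-- ===== SOURCE A (Python) =====
-- def get_knapsack_value(config, values, weights, items, capacity):
--     # retorna o valor da configuracao atual de itens na mochila
--     # caso o peso passe da capacidade max, retorna 0
--     value = 0
--     w = 0
--     for i in range(items):
--         value += config[i] * values[i]
--         w += config[i] * weights[i]
--     return value if w <= capacity else 0
--
-- def get_neightbours(solution, values, weights, items, capacity):
--     results_sol = [] # lista de solucoes vizinhas
--     results_val = [] # lista de valores das solucoes vizinhas
--     for i in range(items):
--         # inverte o valor do item i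
--         solution[i] = 1 - solution[i]
--         # adiciona a solucao vizinha, precisa ser uma copia para nao mandar um ponteiro
--         # e alterar a solucao original
--         results_sol.append(solution.copy())
--         # adiciona o valor da solucao vizinha
--         results_val.append(get_knapsack_value(solution, values, weights, items, capacity))
--         # inverte o valor do item i novamente para voltar a solucao original
--         solution[i] = 1 - solution[i]
--     return results_sol, results_val
-- ===== SOURCE B (Python) =====
-- def get_neightbours(solution, values, weights, items, capacity):
--     # one pre-pass: value/weight of the current solution
--     base_value = 0
--     base_weight = 0
--     for i in range(items):
--         base_value += solution[i] * values[i]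
--         base_weight += solution[i] * weights[i]
--     results_sol = []
--     results_val = []
--     for i in range(items):
--         d = 1 - 2 * solution[i]           # delta when entry i is flipped to 1-solution[i]
--         neighbour = solution.copy()
--         neighbour[i] = 1 - solution[i]
--         results_sol.append(neighbour)
--         w = base_weight + d * weights[i]
--         v = base_value + d * values[i]
--         results_val.append(v if w <= capacity else 0)
--     return results_sol, results_val
-- ===== Notes on version B (the rewrite author's own statement) =====
-- stated objective: alternative
-- what changed: B computes the base value/weight of the solution once and derives each neighbour's value and weight by a delta update instead of rescanning all items per neighbour, and it never mutates the input list.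
-- outside the precondition, e.g. on get_neightbours([1], [2], [3], 2, 10): A raises IndexError, B raises IndexError
import Mathlib
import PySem

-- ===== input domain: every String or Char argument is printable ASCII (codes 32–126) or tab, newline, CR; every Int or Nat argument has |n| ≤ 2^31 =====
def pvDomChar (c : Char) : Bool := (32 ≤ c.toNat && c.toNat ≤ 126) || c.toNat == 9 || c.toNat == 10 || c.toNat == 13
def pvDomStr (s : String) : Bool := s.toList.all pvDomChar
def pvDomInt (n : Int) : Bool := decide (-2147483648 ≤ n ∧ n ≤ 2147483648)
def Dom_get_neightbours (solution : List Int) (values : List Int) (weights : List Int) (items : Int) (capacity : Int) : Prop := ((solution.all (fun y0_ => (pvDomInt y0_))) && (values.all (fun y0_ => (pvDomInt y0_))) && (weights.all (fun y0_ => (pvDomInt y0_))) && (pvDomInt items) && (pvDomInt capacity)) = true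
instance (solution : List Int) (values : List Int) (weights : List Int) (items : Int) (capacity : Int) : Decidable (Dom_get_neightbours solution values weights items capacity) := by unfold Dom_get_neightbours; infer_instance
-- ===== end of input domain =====

-- B computes the base value/weight once and derives each neighbour's value by a delta update
-- instead of rescanning all items per neighbour (and never mutates the input); return values proved equal.
-- (A temporarily mutates `solution` but restores it before returning, so there is no net side effect.)

-- ===== PORT A =====
-- helper: get_knapsack_value(config, values, weights, items, capacity)
def get_knapsack_value (config : List Int) (values : List Int) (weights : List Int) (items : Int) (capacity : Int) : Int :=
  let p := (PySem.List.pyRange 0 items 1).foldl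
    (fun (p : Int × Int) i =>
      (p.1 + PySem.List.pyGetD config i 0 * PySem.List.pyGetD values i 0,
       p.2 + PySem.List.pyGetD config i 0 * PySem.List.pyGetD weights i 0)) (0, 0)
  if p.2 ≤ capacity then p.1 else 0

def get_neightbours (solution : List Int) (values : List Int) (weights : List Int) (items : Int) (capacity : Int) : List (List Int) × List Int :=
  -- loop state: (solution list as mutated in place, results_sol, results_val)
  let st := (PySem.List.pyRange 0 items 1).foldl
    (fun (st : List Int × List (List Int) × List Int) i =>
      let sol := PySem.List.pySetD st.1 i (1 - PySem.List.pyGetD st.1 i 0)     -- solution[i] = 1 - solution[i]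
      let rs := st.2.1 ++ [sol]                                                -- results_sol.append(solution.copy())
      let rv := st.2.2 ++ [get_knapsack_value sol values weights items capacity]
      let sol2 := PySem.List.pySetD sol i (1 - PySem.List.pyGetD sol i 0)      -- solution[i] = 1 - solution[i] (restore)
      (sol2, rs, rv)) (solution, [], [])
  (st.2.1, st.2.2)

-- ===== PORT B =====
def get_neightbours_alt (solution : List Int) (values : List Int) (weights : List Int) (items : Int) (capacity : Int) : List (List Int) × List Int :=
  let base := (PySem.List.pyRange 0 items 1).foldl
    (fun (p : Int × Int) i =>
      (p.1 + PySem.List.pyGetD solution i 0 * PySem.List.pyGetD values i 0,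
       p.2 + PySem.List.pyGetD solution i 0 * PySem.List.pyGetD weights i 0)) (0, 0)
  (PySem.List.pyRange 0 items 1).foldl
    (fun (st : List (List Int) × List Int) i =>
      let d := 1 - 2 * PySem.List.pyGetD solution i 0
      let neighbour := PySem.List.pySetD solution i (1 - PySem.List.pyGetD solution i 0)
      let w := base.2 + d * PySem.List.pyGetD weights i 0
      let v := base.1 + d * PySem.List.pyGetD values i 0
      (st.1 ++ [neighbour], st.2 ++ [if w ≤ capacity then v else 0])) ([], [])

-- ===== PRECONDITION & SPEC =====
-- Pre_ excludes exactly the inputs where A raises IndexError: items exceeding the length of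
-- solution, values or weights. (Negative items give empty ranges and are fine.)
def Pre_get_neightbours (solution : List Int) (values : List Int) (weights : List Int) (items : Int) (capacity : Int) : Prop :=
  items ≤ (solution.length : Int) ∧ items ≤ (values.length : Int) ∧ items ≤ (weights.length : Int)
instance (solution : List Int) (values : List Int) (weights : List Int) (items : Int) (capacity : Int) : Decidable (Pre_get_neightbours solution values weights items capacity) := by unfold Pre_get_neightbours; infer_instance

def pvWitness_get_neightbours : List Int × List Int × List Int × Int × Int := ([1, 0], [2, 3], [1, 1], 2, 2)

def Spec_get_neightbours (solution : List Int) (values : List Int) (weights : List Int) (items : Int) (capacity : Int) (out : List (List Int) × List Int) : Prop := out = get_neightbours_alt solution values weights items capacity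
instance (solution : List Int) (values : List Int) (weights : List Int) (items : Int) (capacity : Int) (out : List (List Int) × List Int) : Decidable (Spec_get_neightbours solution values weights items capacity out) := by unfold Spec_get_neightbours; infer_instance

-- ===== CLAIM (what is proved, stated in full; the proofs are below) =====
def Claim_equal_get_neightbours : Prop := ∀ (solution : List Int) (values : List Int) (weights : List Int) (items : Int) (capacity : Int), Dom_get_neightbours solution values weights items capacity → Pre_get_neightbours solution values weights items capacity → Spec_get_neightbours solution values weights items capacity (get_neightbours solution values weights items capacity)

-- ===== LEMMAS AND PROOFS =====

def pvFlip (solution : List Int) (i : Int) : List Int :=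
  PySem.List.pySetD solution i (1 - PySem.List.pyGetD solution i 0)

lemma pvFlip_eq_set (solution : List Int) (i : Int) (h0 : 0 ≤ i) (hl : i < (solution.length : Int)) :
    pvFlip solution i = solution.set i.toNat (1 - solution[i.toNat]'(by omega)) := by
  rw [pvFlip, PySem.List.pyGetD_eq_getElem solution 0 h0 (by simpa using hl),
     PySem.List.pySetD_of_nonneg solution _ h0]

lemma pvFlip_flip (solution : List Int) (i : Int) (h0 : 0 ≤ i) (hl : i < (solution.length : Int)) :
    PySem.List.pySetD (pvFlip solution i) i (1 - PySem.List.pyGetD (pvFlip solution i) i 0) = solution := by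
  have hk : i.toNat < solution.length := by omega
  rw [pvFlip_eq_set solution i h0 hl]
  rw [PySem.List.pyGetD_eq_getElem _ 0 h0 (by simp; omega),
     PySem.List.pySetD_of_nonneg _ _ h0]
  rw [List.getElem_set_self (by simpa using hk)]
  rw [List.set_set]
  rw [show (1 - (1 - solution[i.toNat]'hk)) = solution[i.toNat]'hk by ring]
  exact List.set_getElem_self hk

lemma pvSum_flip (xs ys : List Int) (i items : Int) (h0 : 0 ≤ i) (hi : i < items)
    (hx : items ≤ (xs.length : Int)) :
    ((PySem.List.pyRange 0 items 1).map
      (fun j => PySem.List.pyGetD (pvFlip xs i) j 0 * PySem.List.pyGetD ys j 0)).sum =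
    ((PySem.List.pyRange 0 items 1).map
      (fun j => PySem.List.pyGetD xs j 0 * PySem.List.pyGetD ys j 0)).sum
      + (1 - 2 * PySem.List.pyGetD xs i 0) * PySem.List.pyGetD ys i 0 := by
  have hk : i.toNat < xs.length := by omega
  have hset : ∀ j : Int, 0 ≤ j → j < items → j ≠ i →
      PySem.List.pyGetD (pvFlip xs i) j 0 = PySem.List.pyGetD xs j 0 := by
    intro j hj0 hji hne
    have hjl : j < (xs.length : Int) := lt_of_lt_of_le hji hx
    rw [pvFlip_eq_set xs i h0 (by omega),
       PySem.List.pyGetD_eq_getElem _ 0 hj0 (by simp; omega),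
       PySem.List.pyGetD_eq_getElem xs 0 hj0 (by simpa using hjl),
       List.getElem_set_ne (by omega)]
  have hat : PySem.List.pyGetD (pvFlip xs i) i 0 = 1 - PySem.List.pyGetD xs i 0 := by
    rw [pvFlip_eq_set xs i h0 (by omega),
       PySem.List.pyGetD_eq_getElem _ 0 h0 (by simp; omega),
       PySem.List.pyGetD_eq_getElem xs 0 h0 (by omega),
       List.getElem_set_self (by simpa using hk)]
  have e1 : List.map (fun j => PySem.List.pyGetD (pvFlip xs i) j 0 * PySem.List.pyGetD ys j 0)
      (PySem.List.pyRange 0 i 1) = List.map (fun j => PySem.List.pyGetD xs j 0 * PySem.List.pyGetD ys j 0)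
      (PySem.List.pyRange 0 i 1) := by
    refine List.map_congr_left (fun j hj => ?_)
    have h := PySem.List.mem_pyRange_one.mp hj
    rw [hset j h.1 (by omega) (by omega)]
  have e2 : List.map (fun j => PySem.List.pyGetD (pvFlip xs i) j 0 * PySem.List.pyGetD ys j 0)
      (PySem.List.pyRange (i + 1) items 1) = List.map (fun j => PySem.List.pyGetD xs j 0 * PySem.List.pyGetD ys j 0)
      (PySem.List.pyRange (i + 1) items 1) := by
    refine List.map_congr_left (fun j hj => ?_)
    have h := PySem.List.mem_pyRange_one.mp hj
    rw [hset j (by omega) h.2 (by omega)]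
  rw [PySem.List.pyRange_one_append 0 i items h0 (le_of_lt hi), PySem.List.pyRange_one_cons hi]
  simp only [List.map_append, List.map_cons, List.sum_append, List.sum_cons]
  rw [e1, e2, hat]
  ring

-- A's loop: the in-place flip is undone each iteration, so the state list stays `solution`
-- and the loop only appends the neighbour and its value.
lemma pvALoop (solution values weights : List Int) (items capacity : Int)
    (l : List Int) (rs : List (List Int)) (rv : List Int)
    (hb : ∀ j ∈ l, 0 ≤ j ∧ j < (solution.length : Int)) :
    l.foldl (fun (st : List Int × List (List Int) × List Int) i =>
      let sol := PySem.List.pySetD st.1 i (1 - PySem.List.pyGetD st.1 i 0)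
      let rs := st.2.1 ++ [sol]
      let rv := st.2.2 ++ [get_knapsack_value sol values weights items capacity]
      let sol2 := PySem.List.pySetD sol i (1 - PySem.List.pyGetD sol i 0)
      (sol2, rs, rv)) (solution, rs, rv)
    = (solution,
       rs ++ l.map (fun i => pvFlip solution i),
       rv ++ l.map (fun i => get_knapsack_value (pvFlip solution i) values weights items capacity)) := by
  induction l generalizing rs rv with
  | nil => simp
  | cons i l ih =>
    obtain ⟨h0, hl⟩ := hb i (List.mem_cons_self ..)
    simp only [List.foldl_cons]
    rw [show (PySem.List.pySetD solution i (1 - PySem.List.pyGetD solution i 0)) = pvFlip solution i from rfl,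
       pvFlip_flip solution i h0 hl]
    rw [ih _ _ (fun j hj => hb j (List.mem_cons_of_mem _ hj))]
    simp

-- ===== VERDICT (by name: the statement is the Claim_ definition above) =====
theorem get_neightbours_spec : Claim_equal_get_neightbours := by
  intro solution values weights items capacity _hdom hpre
  obtain ⟨h1, h2, h3⟩ := hpre
  unfold Spec_get_neightbours get_neightbours get_neightbours_alt
  rw [pvALoop solution values weights items capacity _ [] []
      (fun j hj => by have := PySem.List.mem_pyRange_one.mp hj; exact ⟨this.1, by omega⟩)]
  rw [PySem.List.foldl_prod_mk
      (f := fun (a : Int) j => a + PySem.List.pyGetD solution j 0 * PySem.List.pyGetD values j 0)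
      (g := fun (a : Int) j => a + PySem.List.pyGetD solution j 0 * PySem.List.pyGetD weights j 0)]
  rw [PySem.List.foldl_prod_mk
      (f := fun (s : List (List Int)) i => s ++ [PySem.List.pySetD solution i (1 - PySem.List.pyGetD solution i 0)])
      (g := fun (s : List Int) i => s ++ [if (PySem.List.pyRange 0 items 1).foldl (fun (a : Int) j => a + PySem.List.pyGetD solution j 0 * PySem.List.pyGetD weights j 0) 0 + (1 - 2 * PySem.List.pyGetD solution i 0) * PySem.List.pyGetD weights i 0 ≤ capacity then (PySem.List.pyRange 0 items 1).foldl (fun (a : Int) j => a + PySem.List.pyGetD solution j 0 * PySem.List.pyGetD values j 0) 0 + (1 - 2 * PySem.List.pyGetD solution i 0) * PySem.List.pyGetD values i 0 else 0])]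
  rw [PySem.List.foldl_append_singleton_eq_map, PySem.List.foldl_append_singleton_eq_map]
  refine Prod.ext rfl ?_
  simp only [List.nil_append]
  refine List.map_congr_left (fun i hi => ?_)
  have hm := PySem.List.mem_pyRange_one.mp hi
  unfold get_knapsack_value
  rw [PySem.List.foldl_prod_mk
      (f := fun (a : Int) j => a + PySem.List.pyGetD (pvFlip solution i) j 0 * PySem.List.pyGetD values j 0)
      (g := fun (a : Int) j => a + PySem.List.pyGetD (pvFlip solution i) j 0 * PySem.List.pyGetD weights j 0)]
  simp only [PySem.List.foldl_add, Int.zero_add]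
  rw [pvSum_flip solution values i items hm.1 hm.2 h1,
     pvSum_flip solution weights i items hm.1 hm.2 h1]
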